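-- pv_equiv track=rewrite | github.com/Albertree/SOAR-ARC-test | procedural_memory/base_rules/_primitives.py | kronecker_self
-- ===== SOURCE A (Python) =====
-- def kronecker_self(grid):
--     """Kronecker product of grid with itself.
--     Each non-zero cell is replaced by a copy of the entire grid;
--     each zero cell is replaced by an NxM block of zeros."""
--     h = len(grid)
--     w = len(grid[0]) if grid else 0
--     out_h = h * h
--     out_w = w * w
--     out = [[0] * out_w for _ in range(out_h)]
--     for br in range(h):
--         for bc in range(w):
--             if grid[br][bc] != 0:
--                 for r in range(h):
--                     for c in range(w):
--                         out[br * h + r][bc * w + c] = grid[r][c]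
--     return out
-- ===== SOURCE B (Python) =====
-- def kronecker_self(grid):
--     """Kronecker product of grid with itself, built row by row:
--     each output row is the concatenation, over the cells of one mask row,
--     of either a copy of a content row or a block of zeros."""
--     w = len(grid[0]) if grid else 0
--     zeros = [0] * w
--     out = []
--     for mrow in grid:
--         mask = mrow[:w]
--         for crow in grid:
--             row = []
--             for mc in mask:
--                 row.extend(crow[:w] if mc != 0 else zeros)
--             out.append(row)
--     return out
-- ===== Notes on version B (the rewrite author's own statement) =====
-- stated objective: simpler
-- what changed: B never allocates or indexes a zero matrix and uses no coordinate arithmetic: it builds each output row directly by concatenating, per mask cell, either a copy of a content row (truncated to the first-row width) or a zero block, appending finished rows to the result.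
import Mathlib
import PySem

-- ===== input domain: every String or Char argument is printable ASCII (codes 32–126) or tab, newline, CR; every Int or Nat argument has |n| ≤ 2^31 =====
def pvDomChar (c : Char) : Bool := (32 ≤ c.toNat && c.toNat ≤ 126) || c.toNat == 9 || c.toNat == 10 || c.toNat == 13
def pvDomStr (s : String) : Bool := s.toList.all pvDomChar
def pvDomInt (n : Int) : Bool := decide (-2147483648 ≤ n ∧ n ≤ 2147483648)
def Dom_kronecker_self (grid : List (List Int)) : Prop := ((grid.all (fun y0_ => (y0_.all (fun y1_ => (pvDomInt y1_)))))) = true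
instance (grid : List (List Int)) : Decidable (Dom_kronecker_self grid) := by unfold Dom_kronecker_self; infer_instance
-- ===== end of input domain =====

-- B builds each output row by concatenating row copies / zero blocks (no coordinate
-- arithmetic, no preallocated matrix); same exact result, objective: simpler.

-- ===== PORT A =====
-- out[i][j] = v  (indices are in range on every executed write)
def pvSetCell (out : List (List Int)) (i j : Int) (v : Int) : List (List Int) :=
  PySem.List.pySetD out i (PySem.List.pySetD (PySem.List.pyGetD out i []) j v)

def kronecker_self (grid : List (List Int)) : List (List Int) :=
  let h : Int := grid.length
  let w : Int := if grid ≠ [] then ((PySem.List.pyGetD grid 0 []).length : Int) else 0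
  let out : List (List Int) :=
    List.replicate (h * h).toNat (List.replicate (w * w).toNat 0)
  (PySem.List.pyRange 0 h 1).foldl (fun out br =>
    (PySem.List.pyRange 0 w 1).foldl (fun out bc =>
      if PySem.List.pyGetD (PySem.List.pyGetD grid br []) bc 0 ≠ 0 then
        (PySem.List.pyRange 0 h 1).foldl (fun out r =>
          (PySem.List.pyRange 0 w 1).foldl (fun out c =>
            pvSetCell out (br * h + r) (bc * w + c)
              (PySem.List.pyGetD (PySem.List.pyGetD grid r []) c 0)) out) out
      else out) out) out

-- ===== PORT B =====
def kronecker_self_alt (grid : List (List Int)) : List (List Int) :=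
  let w : Int := if grid ≠ [] then ((PySem.List.pyGetD grid 0 []).length : Int) else 0
  let zeros : List Int := List.replicate w.toNat 0
  grid.foldl (fun out mrow =>
    let mask := PySem.List.slice mrow none (some w)
    grid.foldl (fun out crow =>
      out ++ [mask.foldl (fun row mc =>
        row ++ (if mc ≠ 0 then PySem.List.slice crow none (some w) else zeros)) []]) out) []

-- ===== PRECONDITION & SPEC =====
-- Pre_ excludes exactly the ragged grids with a row shorter than the first row,
-- on which Python A raises IndexError; A returns on every admitted input.
def Pre_kronecker_self (grid : List (List Int)) : Prop :=
  ∀ row ∈ grid, (grid.headD []).length ≤ row.length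
instance (grid : List (List Int)) : Decidable (Pre_kronecker_self grid) := by
  unfold Pre_kronecker_self; infer_instance
def pvWitness_kronecker_self : List (List Int) := [[1, 0], [0, 2]]

def Spec_kronecker_self (grid : List (List Int)) (out : List (List Int)) : Prop := out = kronecker_self_alt grid
instance (grid : List (List Int)) (out : List (List Int)) : Decidable (Spec_kronecker_self grid out) := by unfold Spec_kronecker_self; infer_instance

-- ===== CLAIM (what is proved, stated in full; the proofs are below) =====
def Claim_equal_kronecker_self : Prop := ∀ (grid : List (List Int)), Dom_kronecker_self grid → Pre_kronecker_self grid → Spec_kronecker_self grid (kronecker_self grid)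

-- ===== LEMMAS AND PROOFS =====

def pvW (grid : List (List Int)) : Nat := (grid.headD []).length
def pvG (grid : List (List Int)) (r c : Nat) : Int := (grid.getD r []).getD c 0
def pvSet (m : List (List Int)) (i j : Nat) (v : Int) : List (List Int) :=
  m.set i ((m.getD i []).set j v)
def pvCLoop (h w : Nat) (g : Nat → Nat → Int) (br bc r n : Nat) (m : List (List Int)) : List (List Int) :=
  (List.range n).foldl (fun m c => pvSet m (br * h + r) (bc * w + c) (g r c)) m
def pvRLoop (h w : Nat) (g : Nat → Nat → Int) (br bc n : Nat) (m : List (List Int)) : List (List Int) :=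
  (List.range n).foldl (fun m r => pvCLoop h w g br bc r w m) m
def pvBCLoop (h w : Nat) (g : Nat → Nat → Int) (br n : Nat) (m : List (List Int)) : List (List Int) :=
  (List.range n).foldl (fun m bc => if g br bc ≠ 0 then pvRLoop h w g br bc h m else m) m
def pvBRLoop (h w : Nat) (g : Nat → Nat → Int) (n : Nat) (m : List (List Int)) : List (List Int) :=
  (List.range n).foldl (fun m br => pvBCLoop h w g br w m) m

lemma pvW_cast (grid : List (List Int)) :
    (if grid ≠ [] then ((PySem.List.pyGetD grid 0 []).length : Int) else 0) = (pvW grid : Nat) := by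
  cases grid <;> simp [pvW, PySem.List.pyGetD_zero_cons]

lemma A_nat (grid : List (List Int)) :
    kronecker_self grid =
      pvBRLoop grid.length (pvW grid) (pvG grid) grid.length
        (List.replicate (grid.length * grid.length) (List.replicate (pvW grid * pvW grid) 0)) := by
  unfold kronecker_self
  rw [pvW_cast]
  simp only [← Nat.cast_mul, PySem.List.pyRange_zero_nat, List.foldl_map, Int.toNat_natCast]
  simp only [pvBRLoop, pvBCLoop, pvRLoop, pvCLoop, pvSetCell, pvSet, pvG]
  simp only [← Nat.cast_mul, ← Nat.cast_add, PySem.List.pySetD_natCast, PySem.List.pyGetD_natCast]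

def pvGet (m : List (List Int)) (i j : Nat) : Int := (m.getD i []).getD j 0
def pvShape (h w : Nat) (m : List (List Int)) : Prop :=
  m.length = h * h ∧ ∀ k, k < h * h → (m.getD k []).length = w * w

lemma blockIdx_lt {h br r : Nat} (hbr : br < h) (hr : r < h) : br * h + r < h * h := by
  calc br * h + r < br * h + h := by omega
    _ = (br + 1) * h := by ring
    _ ≤ h * h := Nat.mul_le_mul_right _ hbr

lemma getD_set_self {α : Type} (m : List α) (i : Nat) (x : α) (d : α) (h : i < m.length) :
    (m.set i x).getD i d = x := by
  simp [List.getD_eq_getElem?_getD, h]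

lemma getD_set_ne {α : Type} (m : List α) (i k : Nat) (x : α) (d : α) (h : k ≠ i) :
    (m.set i x).getD k d = m.getD k d := by
  simp [List.getD_eq_getElem?_getD, Ne.symm h]

lemma pvShape_pvSet {h w : Nat} {m : List (List Int)} (hs : pvShape h w m)
    {i : Nat} (hi : i < h * h) (j : Nat) (v : Int) : pvShape h w (pvSet m i j v) := by
  obtain ⟨hl, hr⟩ := hs
  refine ⟨by simp [pvSet, hl], ?_⟩
  intro k hk
  by_cases hki : k = i
  · subst hki
    rw [pvSet, getD_set_self _ _ _ _ (by omega), List.length_set]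
    exact hr k hk
  · rw [pvSet, getD_set_ne _ _ _ _ _ hki]
    exact hr k hk

lemma pvGet_pvSet {h w : Nat} {m : List (List Int)} (hs : pvShape h w m)
    {i j : Nat} (hi : i < h * h) (hj : j < w * w) (v : Int) (i' j' : Nat) :
    pvGet (pvSet m i j v) i' j' = if i' = i ∧ j' = j then v else pvGet m i' j' := by
  obtain ⟨hl, hr⟩ := hs
  by_cases hii : i' = i
  · subst hii
    rw [pvGet, pvSet, getD_set_self _ _ _ _ (by omega)]
    by_cases hjj : j' = j
    · subst hjj
      rw [getD_set_self _ _ _ _ (by rw [hr i' hi]; omega)]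
      simp
    · rw [getD_set_ne _ _ _ _ _ hjj]
      simp [hjj, pvGet]
  · rw [pvGet, pvSet, getD_set_ne _ _ _ _ _ hii]
    simp [hii, pvGet]

lemma pvCLoop_spec {h w : Nat} {g : Nat → Nat → Int} {br bc r : Nat}
    (hbr : br < h) (hbc : bc < w) (hr' : r < h) :
    ∀ n, n ≤ w → ∀ m, pvShape h w m →
      pvShape h w (pvCLoop h w g br bc r n m) ∧
      ∀ i j, pvGet (pvCLoop h w g br bc r n m) i j =
        if i = br * h + r ∧ bc * w ≤ j ∧ j < bc * w + n then g r (j - bc * w)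
        else pvGet m i j := by
  intro n
  induction n with
  | zero =>
    intro _ m hs
    simp only [pvCLoop, List.range_zero, List.foldl_nil]
    refine ⟨hs, fun i j => ?_⟩
    rw [if_neg (by omega)]
  | succ n ih =>
    intro hn m hs
    obtain ⟨hs', hget⟩ := ih (by omega) m hs
    have hstep : pvCLoop h w g br bc r (n + 1) m =
        pvSet (pvCLoop h w g br bc r n m) (br * h + r) (bc * w + n) (g r n) := by
      simp [pvCLoop, List.range_succ]
    have hin : br * h + r < h * h := blockIdx_lt hbr hr'
    have hjn : bc * w + n < w * w := blockIdx_lt hbc (by omega)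
    refine ⟨by rw [hstep]; exact pvShape_pvSet hs' hin _ _, fun i j => ?_⟩
    rw [hstep, pvGet_pvSet hs' hin hjn _ i j, hget i j]
    split_ifs <;> first | rfl | (congr 1; omega) | omega | (exfalso; omega)

lemma pvRLoop_spec {h w : Nat} {g : Nat → Nat → Int} {br bc : Nat}
    (hbr : br < h) (hbc : bc < w) :
    ∀ n, n ≤ h → ∀ m, pvShape h w m →
      pvShape h w (pvRLoop h w g br bc n m) ∧
      ∀ i j, pvGet (pvRLoop h w g br bc n m) i j =
        if br * h ≤ i ∧ i < br * h + n ∧ bc * w ≤ j ∧ j < bc * w + w then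
          g (i - br * h) (j - bc * w)
        else pvGet m i j := by
  intro n
  induction n with
  | zero =>
    intro _ m hs
    simp only [pvRLoop, List.range_zero, List.foldl_nil]
    refine ⟨hs, fun i j => ?_⟩
    rw [if_neg (by omega)]
  | succ n ih =>
    intro hn m hs
    obtain ⟨hs', hget⟩ := ih (by omega) m hs
    have hstep : pvRLoop h w g br bc (n + 1) m =
        pvCLoop h w g br bc n w (pvRLoop h w g br bc n m) := by
      simp [pvRLoop, List.range_succ]
    obtain ⟨hs'', hcget⟩ := pvCLoop_spec hbr hbc (show n < h by omega) w le_rfl _ hs'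
    refine ⟨by rw [hstep]; exact hs'', fun i j => ?_⟩
    rw [hstep, hcget i j, hget i j]
    split_ifs <;> first | rfl | (congr 1 <;> omega) | omega | (exfalso; omega)

lemma pvBCLoop_spec {h w : Nat} {g : Nat → Nat → Int} {br : Nat} (hbr : br < h) :
    ∀ n, n ≤ w → ∀ m, pvShape h w m →
      pvShape h w (pvBCLoop h w g br n m) ∧
      ∀ i j, pvGet (pvBCLoop h w g br n m) i j =
        if br * h ≤ i ∧ i < br * h + h ∧ j < n * w ∧ g br (j / w) ≠ 0 then
          g (i - br * h) (j % w)
        else pvGet m i j := by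
  intro n
  induction n with
  | zero =>
    intro _ m hs
    simp only [pvBCLoop, List.range_zero, List.foldl_nil]
    refine ⟨hs, fun i j => ?_⟩
    rw [if_neg (by rintro ⟨-, -, hj, -⟩; omega)]
  | succ n ih =>
    intro hn m hs
    obtain ⟨hs', hget⟩ := ih (by omega) m hs
    have hstep : pvBCLoop h w g br (n + 1) m =
        if g br n ≠ 0 then pvRLoop h w g br n h (pvBCLoop h w g br n m)
        else pvBCLoop h w g br n m := by
      simp [pvBCLoop, List.range_succ]
    have hmul : (n + 1) * w = n * w + w := by ring
    by_cases hg : g br n ≠ 0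
    · obtain ⟨hs'', hrget⟩ := pvRLoop_spec hbr (show n < w by omega) h le_rfl _ hs'
      refine ⟨by rw [hstep, if_pos hg]; exact hs'', fun i j => ?_⟩
      rw [hstep, if_pos hg, hrget i j, hget i j, hmul]
      by_cases hj : n * w ≤ j ∧ j < n * w + w
      · have hdiv : j / w = n :=
          Nat.div_eq_of_lt_le hj.1 (by rw [Nat.succ_mul]; omega)
        have hmod : j % w = j - n * w := by
          rw [Nat.mod_eq_sub_mul_div, hdiv, Nat.mul_comm]
        rw [hdiv, hmod]
        split_ifs <;> first | rfl | omega | (exfalso; omega) |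
          (exact absurd hg (by assumption)) | (exact absurd (by assumption) hg) |
          (exfalso; simp_all)
      · rw [if_neg (by rintro ⟨-, -, h1, h2⟩; exact hj ⟨h1, h2⟩)]
        by_cases hj2 : j < n * w
        · exact if_congr
            (by constructor <;> (rintro ⟨a, b, c, d⟩; exact ⟨a, b, by omega, d⟩)) rfl rfl
        · rw [if_neg (by rintro ⟨-, -, hc, -⟩; omega),
            if_neg (by rintro ⟨-, -, hc, -⟩; omega)]
    · refine ⟨by rw [hstep, if_neg hg]; exact hs', fun i j => ?_⟩
      rw [hstep, if_neg hg, hget i j, hmul]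
      by_cases hj : n * w ≤ j ∧ j < n * w + w
      · have hdiv : j / w = n :=
          Nat.div_eq_of_lt_le hj.1 (by rw [Nat.succ_mul]; omega)
        rw [if_neg (by rintro ⟨-, -, hc, -⟩; omega),
          if_neg (by rintro ⟨-, -, -, hc⟩; rw [hdiv] at hc; exact hg hc)]
      · by_cases hj2 : j < n * w
        · exact if_congr
            (by constructor <;> (rintro ⟨a, b, c, d⟩; exact ⟨a, b, by omega, d⟩)) rfl rfl
        · rw [if_neg (by rintro ⟨-, -, hc, -⟩; omega),
            if_neg (by rintro ⟨-, -, hc, -⟩; omega)]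

lemma pvBRLoop_spec {h w : Nat} {g : Nat → Nat → Int} :
    ∀ n, n ≤ h → ∀ m, pvShape h w m →
      pvShape h w (pvBRLoop h w g n m) ∧
      ∀ i j, pvGet (pvBRLoop h w g n m) i j =
        if i < n * h ∧ j < w * w ∧ g (i / h) (j / w) ≠ 0 then
          g (i % h) (j % w)
        else pvGet m i j := by
  intro n
  induction n with
  | zero =>
    intro _ m hs
    simp only [pvBRLoop, List.range_zero, List.foldl_nil]
    refine ⟨hs, fun i j => ?_⟩
    rw [if_neg (by rintro ⟨hc, -, -⟩; omega)]
  | succ n ih =>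
    intro hn m hs
    obtain ⟨hs', hget⟩ := ih (by omega) m hs
    have hstep : pvBRLoop h w g (n + 1) m =
        pvBCLoop h w g n w (pvBRLoop h w g n m) := by
      simp [pvBRLoop, List.range_succ]
    obtain ⟨hs'', hbget⟩ := pvBCLoop_spec (show n < h by omega) w le_rfl _ hs'
    refine ⟨by rw [hstep]; exact hs'', fun i j => ?_⟩
    rw [hstep, hbget i j, hget i j]
    have hmul : (n + 1) * h = n * h + h := by ring
    rw [hmul]
    by_cases hi : n * h ≤ i ∧ i < n * h + h
    · have hdiv : i / h = n :=
        Nat.div_eq_of_lt_le hi.1 (by rw [Nat.succ_mul]; omega)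
      have hmod : i % h = i - n * h := by
        rw [Nat.mod_eq_sub_mul_div, hdiv, Nat.mul_comm]
      rw [hdiv, hmod]
      split_ifs <;> first | rfl | omega | (exfalso; omega) | (exfalso; simp_all)
    · rw [if_neg (by rintro ⟨h1, h2, -, -⟩; exact hi ⟨h1, h2⟩)]
      by_cases hi2 : i < n * h
      · exact if_congr (by constructor <;> (rintro ⟨a, b, c⟩; exact ⟨by omega, b, c⟩)) rfl rfl
      · rw [if_neg (by rintro ⟨hc, -, -⟩; omega), if_neg (by rintro ⟨hc, -, -⟩; omega)]

lemma core (h w : Nat) (g : Nat → Nat → Int) :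
    pvBRLoop h w g h (List.replicate (h * h) (List.replicate (w * w) 0)) =
      (List.range (h * h)).map (fun i =>
        (List.range (w * w)).map (fun j =>
          if g (i / h) (j / w) ≠ 0 then g (i % h) (j % w) else 0)) := by
  have hs0 : pvShape h w (List.replicate (h * h) (List.replicate (w * w) (0 : Int))) := by
    refine ⟨by simp, fun k hk => ?_⟩
    simp [List.getD_eq_getElem?_getD, List.getElem?_replicate, hk]
  have hget0 : ∀ i j, pvGet (List.replicate (h * h) (List.replicate (w * w) (0 : Int))) i j = 0 := by
    intro i j
    unfold pvGet
    by_cases hi : i < h * h <;>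
      simp [List.getD_eq_getElem?_getD, List.getElem?_replicate, hi] <;>
      by_cases hj : j < w * w <;> simp [hj]
  obtain ⟨⟨hl, hrow⟩, hget⟩ := pvBRLoop_spec (g := g) h le_rfl _ hs0
  apply List.ext_getElem
  · simp [hl]
  · intro i h1 h2
    have hiR : i < h * h := by rw [hl] at h1; exact h1
    have hrowlen :
        (pvBRLoop h w g h (List.replicate (h * h) (List.replicate (w * w) 0)))[i].length
          = w * w := by
      have := hrow i hiR
      rwa [List.getD_eq_getElem?_getD, List.getElem?_eq_getElem h1, Option.getD_some] at this
    apply List.ext_getElem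
    · simpa [hiR] using hrowlen
    · intro j hj1 hj2
      have hjR : j < w * w := by rwa [hrowlen] at hj1
      have hcell : pvGet (pvBRLoop h w g h (List.replicate (h * h) (List.replicate (w * w) 0))) i j
          = if g (i / h) (j / w) ≠ 0 then g (i % h) (j % w) else 0 := by
        rw [hget i j, hget0]
        by_cases hgp : g (i / h) (j / w) ≠ 0
        · rw [if_pos ⟨hiR, hjR, hgp⟩, if_pos hgp]
        · rw [if_neg (by tauto), if_neg hgp]
      have hrowe : (pvBRLoop h w g h (List.replicate (h * h) (List.replicate (w * w) 0))).getD i []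
          = (pvBRLoop h w g h (List.replicate (h * h) (List.replicate (w * w) 0)))[i] := by
        rw [List.getD_eq_getElem?_getD, List.getElem?_eq_getElem h1, Option.getD_some]
      have hLg : (pvBRLoop h w g h (List.replicate (h * h) (List.replicate (w * w) 0)))[i][j]
          = pvGet (pvBRLoop h w g h (List.replicate (h * h) (List.replicate (w * w) 0))) i j := by
        rw [pvGet, hrowe, List.getD_eq_getElem?_getD, List.getElem?_eq_getElem hj1, Option.getD_some]
      rw [hLg, hcell]
      simp [hiR, hjR]

-- ---- B-side lemmas ----

lemma foldl_app_flat {α β : Type} (g : α → List β) :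
    ∀ (l : List α) (acc : List β),
      l.foldl (fun out x => out ++ g x) acc = acc ++ l.flatMap g := by
  intro l
  induction l with
  | nil => simp
  | cons x xs ih => intro acc; simp [ih]

lemma map_eq_range_map {α β : Type} (d : α) (l : List α) (f : α → β) :
    l.map f = (List.range l.length).map (fun i => f (l.getD i d)) := by
  apply List.ext_getElem
  · simp
  · intro i h1 h2
    simp [List.getD_eq_getElem?_getD, List.getElem?_eq_getElem, h1,
      List.length_map, List.length_range] at *
    simp [List.getElem?_eq_getElem (by simpa using h1 : i < l.length)]

lemma take_eq_range_map (row : List Int) (w : Nat) (hw : w ≤ row.length) :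
    row.take w = (List.range w).map (fun c => row.getD c 0) := by
  apply List.ext_getElem
  · simp [hw]
  · intro i h1 h2
    have hi : i < w := by simpa [hw] using h1
    have hi' : i < row.length := lt_of_lt_of_le hi hw
    simp [List.getElem_take, List.getD_eq_getElem?_getD, List.getElem?_eq_getElem hi', hi]

lemma range_mul_map {β : Type} (a b : Nat) (f : Nat → β) :
    (List.range (a * b)).map f =
      (List.range a).flatMap (fun p => (List.range b).map (fun q => f (p * b + q))) := by
  induction a with
  | zero => simp
  | succ a ih =>
    rw [Nat.succ_mul, List.range_add, List.map_append, ih, List.range_succ,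
      List.flatMap_append]
    simp

lemma flatMap_single {α β : Type} (f : α → β) :
    ∀ (l : List α), l.flatMap (fun x => [f x]) = l.map f := by
  intro l
  induction l with
  | nil => rfl
  | cons x xs ih => simp [ih]

lemma B_struct (grid : List (List Int)) :
    kronecker_self_alt grid =
      grid.flatMap (fun mrow =>
        grid.map (fun crow =>
          (mrow.take (pvW grid)).flatMap (fun mc =>
            if mc ≠ 0 then crow.take (pvW grid) else List.replicate (pvW grid) 0))) := by
  unfold kronecker_self_alt
  rw [pvW_cast]
  simp only [PySem.List.slice_to_natCast, Int.toNat_natCast,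
    foldl_app_flat, List.nil_append]
  simp only [flatMap_single]

lemma mulAdd_div {b p q : Nat} (hq : q < b) : (p * b + q) / b = p := by
  rw [Nat.mul_comm, Nat.mul_add_div (by omega), Nat.div_eq_of_lt hq]
  omega

lemma mulAdd_mod {b p q : Nat} (hq : q < b) : (p * b + q) % b = q := by
  rw [Nat.mul_comm, Nat.mul_add_mod, Nat.mod_eq_of_lt hq]

lemma coord_eq_nested (h w : Nat) (g : Nat → Nat → Int) :
    (List.range (h * h)).map (fun i =>
      (List.range (w * w)).map (fun j =>
        if g (i / h) (j / w) ≠ 0 then g (i % h) (j % w) else 0)) =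
    (List.range h).flatMap (fun br =>
      (List.range h).map (fun r =>
        (List.range w).flatMap (fun bc =>
          if g br bc ≠ 0 then (List.range w).map (fun c => g r c)
          else List.replicate w 0))) := by
  rw [range_mul_map, List.flatMap_def, List.flatMap_def]
  apply congrArg List.flatten
  apply List.map_congr_left
  intro br hbr
  rw [List.mem_range] at hbr
  apply List.map_congr_left
  intro r hr
  rw [List.mem_range] at hr
  rw [mulAdd_div hr, mulAdd_mod hr, range_mul_map, List.flatMap_def, List.flatMap_def]
  apply congrArg List.flatten
  apply List.map_congr_left
  intro bc hbc
  rw [List.mem_range] at hbc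
  by_cases hg : g br bc ≠ 0
  · rw [if_pos hg]
    apply List.map_congr_left
    intro c hc
    rw [List.mem_range] at hc
    rw [mulAdd_div hc, mulAdd_mod hc, if_pos hg]
  · rw [if_neg hg]
    have hz : ∀ c ∈ List.range w,
        (if g br ((bc * w + c) / w) ≠ 0 then g r ((bc * w + c) % w) else 0) = (0 : Int) := by
      intro c hc
      rw [List.mem_range] at hc
      rw [mulAdd_div hc, if_neg hg]
    rw [List.map_congr_left hz, List.map_const']
    simp

lemma flatMap_eq_range {α β : Type} (d : α) (l : List α) (f : α → List β) :
    l.flatMap f = (List.range l.length).flatMap (fun i => f (l.getD i d)) := by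
  rw [List.flatMap_def, List.flatMap_def, map_eq_range_map d]

lemma B_nested (grid : List (List Int)) (hpre : Pre_kronecker_self grid) :
    kronecker_self_alt grid =
      (List.range grid.length).flatMap (fun br =>
        (List.range grid.length).map (fun r =>
          (List.range (pvW grid)).flatMap (fun bc =>
            if pvG grid br bc ≠ 0 then (List.range (pvW grid)).map (fun c => pvG grid r c)
            else List.replicate (pvW grid) 0))) := by
  have hlen : ∀ k, k < grid.length → pvW grid ≤ (grid.getD k []).length := by
    intro k hk
    have hmem : grid.getD k [] ∈ grid := by
      rw [List.getD_eq_getElem?_getD, List.getElem?_eq_getElem hk, Option.getD_some]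
      exact List.getElem_mem hk
    exact hpre _ hmem
  rw [B_struct, flatMap_eq_range ([] : List Int) grid]
  rw [List.flatMap_def, List.flatMap_def]
  apply congrArg List.flatten
  apply List.map_congr_left
  intro br hbr
  rw [List.mem_range] at hbr
  rw [map_eq_range_map ([] : List Int) grid]
  apply List.map_congr_left
  intro r hr
  rw [List.mem_range] at hr
  rw [take_eq_range_map _ _ (hlen br hbr), take_eq_range_map _ _ (hlen r hr)]
  rw [List.flatMap_def, List.map_map, ← List.flatMap_def]
  rfl

lemma main_eq (grid : List (List Int)) (hpre : Pre_kronecker_self grid) :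
    kronecker_self grid = kronecker_self_alt grid := by
  rw [A_nat, core, coord_eq_nested, B_nested grid hpre]

-- ===== VERDICT (by name: the statement is the Claim_ definition above) =====
theorem kronecker_self_spec : Claim_equal_kronecker_self := by
  intro grid _ hpre
  unfold Spec_kronecker_self
  exact main_eq grid hpre
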